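-- pv_equiv track=rewrite | github.com/Alatr1ek/novayalaba1and2 | Лаб. работа №5,7 Камаев Марсель ИСТбд-12/5.2.py | find_optimal_team_python
-- ===== SOURCE A (Python) =====
-- from itertools import combinations
--
-- def find_optimal_team_python(cands, k, stats, budget):
--     best_skill = -1
--     best_team = tuple()
--     all_teams = combinations(cands, k)
--     for team in all_teams:
--         total_cost = sum(stats[c]['cost'] for c in team)
--         total_skill = sum(stats[c]['skill'] for c in team)
--
--         if total_cost <= budget:
--             if total_skill > best_skill:
--                 best_skill = total_skill
--                 best_team = team
--
--     return (best_team, best_skill)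
-- ===== SOURCE B (Python) =====
-- def find_optimal_team_python(cands, k, stats, budget):
--     # depth-first recursion over candidate indices in increasing order,
--     # carrying incremental cost/skill accumulators; visits complete teams
--     # in exactly itertools.combinations order, so ties break the same way.
--     n = len(cands)
--     best_team = tuple()
--     best_skill = -1
--
--     def go(i, left, team, cost, skill):
--         nonlocal best_team, best_skill
--         if left == 0:
--             if cost <= budget and skill > best_skill:
--                 best_team = tuple(team)
--                 best_skill = skill
--             return
--         if n - i < left:
--             return  # not enough candidates remain to complete a team
--         for j in range(i, n):
--             c = cands[j]
--             team.append(c)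
--             go(j + 1, left - 1, team,
--                cost + stats[c]['cost'], skill + stats[c]['skill'])
--             team.pop()
--
--     if k < 0:
--         raise ValueError("k must be non-negative")
--     go(0, k, [], 0, 0)
--     return (best_team, best_skill)
-- ===== Notes on version B (the rewrite author's own statement) =====
-- stated objective: alternative
-- what changed: Replaces the itertools.combinations materialization plus per-team O(k) summations with a direct depth-first recursion over candidate indices that carries incremental cost/skill accumulators and mutable best state, pruning branches that cannot reach size k.
import Mathlib
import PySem

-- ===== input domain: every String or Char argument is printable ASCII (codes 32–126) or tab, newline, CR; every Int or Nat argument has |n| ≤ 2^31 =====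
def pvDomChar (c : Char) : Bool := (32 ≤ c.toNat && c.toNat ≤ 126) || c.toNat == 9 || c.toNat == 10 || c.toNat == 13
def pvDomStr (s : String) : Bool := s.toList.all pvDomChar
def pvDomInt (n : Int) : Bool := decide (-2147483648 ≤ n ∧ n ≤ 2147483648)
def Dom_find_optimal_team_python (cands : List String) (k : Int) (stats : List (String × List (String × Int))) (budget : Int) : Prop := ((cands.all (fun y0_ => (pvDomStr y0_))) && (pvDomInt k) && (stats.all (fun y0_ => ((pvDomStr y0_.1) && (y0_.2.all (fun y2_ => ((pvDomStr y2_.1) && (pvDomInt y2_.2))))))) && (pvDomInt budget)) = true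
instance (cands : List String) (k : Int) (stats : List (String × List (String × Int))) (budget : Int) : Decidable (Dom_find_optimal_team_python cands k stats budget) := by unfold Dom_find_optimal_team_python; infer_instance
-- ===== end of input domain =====

-- B replaces the combinations enumeration + per-team summations of A by a
-- depth-first index recursion with incremental cost/skill accumulators (alternative decomposition).


-- shared helper: stats[c][fld] as a total function (default 0 outside Pre_, where Python raises)
def fieldOf (stats : List (String × List (String × Int))) (fld : String) (c : String) : Int :=
  match (PySem.Dict.mk stats).get? c with
  | some d => ((PySem.Dict.mk d).get? fld).getD 0
  | none => 0

-- ===== PORT A =====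
-- itertools.combinations over a list, in itertools order
def pvCombos : List String → Nat → List (List String)
  | _, 0 => [[]]
  | [], _ + 1 => []
  | c :: rest, n + 1 => (pvCombos rest n).map (c :: ·) ++ pvCombos rest (n + 1)

def find_optimal_team_python (cands : List String) (k : Int) (stats : List (String × List (String × Int))) (budget : Int) : List String × Int :=
  (pvCombos cands k.toNat).foldl
    (fun best team =>
      let total_cost := (team.map (fieldOf stats "cost")).sum
      let total_skill := (team.map (fieldOf stats "skill")).sum
      if total_cost ≤ budget then
        if total_skill > best.2 then (team, total_skill) else best
      else best)
    ([], -1)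

-- ===== PORT B =====
-- depth-first recursion over the remaining-candidates suffix, carrying the
-- partial team, incremental cost/skill accumulators and the best-so-far state
def goB (budget : Int) (C S : String → Int) :
    List String → Int → List String → Int → Int → (List String × Int) → (List String × Int)
  | [], left, team, cost, skill, best =>
    if left = 0 then
      if cost ≤ budget ∧ skill > best.2 then (team, skill) else best
    else best
  | c :: rest, left, team, cost, skill, best =>
    if left = 0 then
      if cost ≤ budget ∧ skill > best.2 then (team, skill) else best
    else if (((c :: rest).length : Int)) < left then best
    else
      let best1 := goB budget C S rest (left - 1) (team ++ [c]) (cost + C c) (skill + S c) best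
      goB budget C S rest left team cost skill best1

def find_optimal_team_python_alt (cands : List String) (k : Int) (stats : List (String × List (String × Int))) (budget : Int) : List String × Int :=
  goB budget (fieldOf stats "cost") (fieldOf stats "skill") cands k [] 0 0 ([], -1)

-- ===== PRECONDITION & SPEC =====
def pvKeysOK (stats : List (String × List (String × Int))) (c : String) : Bool :=
  match (PySem.Dict.mk stats).get? c with
  | some d => ((PySem.Dict.mk d).get? "cost").isSome && ((PySem.Dict.mk d).get? "skill").isSome
  | none => false

-- Pre_ excludes exactly the inputs where A raises: k < 0 (ValueError from
-- combinations) and teams actually enumerated containing a candidate whose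
-- stats entry or its 'cost'/'skill' key is missing (KeyError).
def Pre_find_optimal_team_python (cands : List String) (k : Int) (stats : List (String × List (String × Int))) (budget : Int) : Prop :=
  0 ≤ k ∧ (k = 0 ∨ (cands.length : Int) < k ∨ ∀ c ∈ cands, pvKeysOK stats c = true)
instance (cands : List String) (k : Int) (stats : List (String × List (String × Int))) (budget : Int) : Decidable (Pre_find_optimal_team_python cands k stats budget) := by unfold Pre_find_optimal_team_python; infer_instance

def pvWitness_find_optimal_team_python : List String × Int × (List (String × List (String × Int))) × Int :=
  (["a", "b", "c"], 2,
   [("a", [("cost", 3), ("skill", 5)]), ("b", [("cost", 2), ("skill", 4)]), ("c", [("cost", 1), ("skill", 4)])],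
   4)

def Spec_find_optimal_team_python (cands : List String) (k : Int) (stats : List (String × List (String × Int))) (budget : Int) (out : List String × Int) : Prop := out = find_optimal_team_python_alt cands k stats budget
instance (cands : List String) (k : Int) (stats : List (String × List (String × Int))) (budget : Int) (out : List String × Int) : Decidable (Spec_find_optimal_team_python cands k stats budget out) := by unfold Spec_find_optimal_team_python; infer_instance

-- ===== CLAIM (what is proved, stated in full; the proofs are below) =====
def Claim_equal_find_optimal_team_python : Prop := ∀ (cands : List String) (k : Int) (stats : List (String × List (String × Int))) (budget : Int), Dom_find_optimal_team_python cands k stats budget → Pre_find_optimal_team_python cands k stats budget → Spec_find_optimal_team_python cands k stats budget (find_optimal_team_python cands k stats budget)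

-- ===== LEMMAS AND PROOFS =====

def stepA (budget : Int) (C S : String → Int) (best : List String × Int) (team : List String) : List String × Int :=
  let total_cost := (team.map C).sum
  let total_skill := (team.map S).sum
  if total_cost ≤ budget then
    if total_skill > best.2 then (team, total_skill) else best
  else best

lemma combos_nil_of_short : ∀ (l : List String) (n : Nat), l.length < n → pvCombos l n = [] := by
  intro l
  induction l with
  | nil => intro n h; cases n with
    | zero => omega
    | succ m => rfl
  | cons c rest ih =>
    intro n h
    cases n with
    | zero => omega
    | succ m =>
      simp only [List.length_cons] at h
      simp only [pvCombos]
      rw [ih m (by omega), ih (m + 1) (by omega)]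
      simp

lemma stepA_base (budget : Int) (C S : String → Int) (team : List String) (best : List String × Int) :
    (if (team.map C).sum ≤ budget ∧ best.2 < (team.map S).sum then (team, (team.map S).sum) else best)
      = stepA budget C S best team := by
  unfold stepA
  by_cases h1 : (team.map C).sum ≤ budget <;> by_cases h2 : best.2 < (team.map S).sum <;>
    simp [h1, h2]

lemma goB_eq (budget : Int) (C S : String → Int) :
    ∀ (rem : List String) (left : Int) (team : List String) (best : List String × Int),
      0 ≤ left →
      goB budget C S rem left team ((team.map C).sum) ((team.map S).sum) best
        = ((pvCombos rem left.toNat).map (team ++ ·)).foldl (stepA budget C S) best := by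
  intro rem
  induction rem with
  | nil =>
    intro left team best hle
    by_cases h0 : left = 0
    · subst h0
      simp only [goB, Int.toNat_zero, pvCombos, List.map_cons, List.map_nil,
        List.foldl_cons, List.foldl_nil, List.append_nil]
      exact stepA_base budget C S team best
    · have hpos : 0 < left := lt_of_le_of_ne hle (Ne.symm h0)
      rw [combos_nil_of_short [] left.toNat (by simp only [List.length_nil]; omega)]
      simp [goB, h0]
  | cons c rest ih =>
    intro left team best hle
    by_cases h0 : left = 0
    · subst h0
      simp only [goB, Int.toNat_zero, pvCombos, List.map_cons, List.map_nil,
        List.foldl_cons, List.foldl_nil, List.append_nil]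
      exact stepA_base budget C S team best
    · have hpos : 0 < left := lt_of_le_of_ne hle (Ne.symm h0)
      simp only [goB, if_neg h0]
      by_cases hshort : ((c :: rest).length : Int) < left
      · rw [if_pos hshort,
          combos_nil_of_short (c :: rest) left.toNat (by simp only [List.length_cons] at hshort ⊢; omega)]
        simp
      · rw [if_neg hshort]
        have hnat : left.toNat = (left - 1).toNat + 1 := by omega
        rw [hnat]
        simp only [pvCombos, List.map_append, List.map_map, List.foldl_append]
        have hcomp : ((team ++ ·) ∘ (c :: ·)) = fun l => (team ++ [c]) ++ l := by
          funext l; simp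
        rw [hcomp]
        have e1 : goB budget C S rest (left - 1) (team ++ [c])
            ((team.map C).sum + C c) ((team.map S).sum + S c) best
            = ((pvCombos rest (left - 1).toNat).map ((team ++ [c]) ++ ·)).foldl (stepA budget C S) best := by
          have := ih (left - 1) (team ++ [c]) best (by omega)
          simpa using this
        have e2 := ih left team
          (((pvCombos rest (left - 1).toNat).map ((team ++ [c]) ++ ·)).foldl (stepA budget C S) best) hle
        rw [hnat] at e2
        show goB budget C S rest left team ((team.map C).sum) ((team.map S).sum)
            (goB budget C S rest (left - 1) (team ++ [c])
              ((team.map C).sum + C c) ((team.map S).sum + S c) best) = _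
        rw [e1, e2]

lemma foldl_stepA_eq (budget : Int) (C S : String → Int) :
    ∀ (l : List (List String)) (best : List String × Int),
      l.foldl (fun best team =>
          let total_cost := (team.map C).sum
          let total_skill := (team.map S).sum
          if total_cost ≤ budget then
            if total_skill > best.2 then (team, total_skill) else best
          else best) best
        = l.foldl (stepA budget C S) best := by
  intro l; induction l with
  | nil => intro best; rfl
  | cons t rest ih => intro best; simp only [List.foldl]; rw [ih]; rfl

-- ===== VERDICT (by name: the statement is the Claim_ definition above) =====
theorem find_optimal_team_python_spec : Claim_equal_find_optimal_team_python := by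
  intro cands k stats budget _ hpre
  obtain ⟨hk, _⟩ := hpre
  unfold Spec_find_optimal_team_python find_optimal_team_python find_optimal_team_python_alt
  rw [foldl_stepA_eq]
  have := goB_eq budget (fieldOf stats "cost") (fieldOf stats "skill") cands k [] ([], -1) hk
  simpa using this.symm
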